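-- pv_equiv track=rewrite | github.com/aAT0047/Autosvp | SIMULATION/usingtools.py | get_map_edge_labels
-- ===== SOURCE A (Python) =====
-- def get_map_edge_labels(edge_l, nodes):
--     edge_labels = []
--     for i in range(len(nodes) - 1):
--         src_node = nodes[i]
--         dst_node = nodes[i + 1]
--
--         for edge_info in edge_l:
--             current_edge_key, label = edge_info
--             current_src_node, current_dst_node, current_key = current_edge_key
--
--             if current_src_node == src_node and current_dst_node == dst_node:
--                 edge_labels.extend([[src_node, dst_node, current_key, label]])
--
--     return edge_labels
-- ===== SOURCE B (Python) =====
-- def get_map_edge_labels(edge_l, nodes):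
--     groups = {}
--     for (s, d, k), label in edge_l:
--         groups.setdefault((s, d), []).append([s, d, k, label])
--     edge_labels = []
--     for pair in zip(nodes, nodes[1:]):
--         edge_labels.extend(groups.get(pair, []))
--     return edge_labels
-- ===== Notes on version B (the rewrite author's own statement) =====
-- stated objective: faster
-- what changed: B groups the edges once into a dict keyed by (src,dst) and then concatenates the precomputed row lists along the consecutive node pairs, instead of rescanning the whole edge list for every pair.
import Mathlib
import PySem

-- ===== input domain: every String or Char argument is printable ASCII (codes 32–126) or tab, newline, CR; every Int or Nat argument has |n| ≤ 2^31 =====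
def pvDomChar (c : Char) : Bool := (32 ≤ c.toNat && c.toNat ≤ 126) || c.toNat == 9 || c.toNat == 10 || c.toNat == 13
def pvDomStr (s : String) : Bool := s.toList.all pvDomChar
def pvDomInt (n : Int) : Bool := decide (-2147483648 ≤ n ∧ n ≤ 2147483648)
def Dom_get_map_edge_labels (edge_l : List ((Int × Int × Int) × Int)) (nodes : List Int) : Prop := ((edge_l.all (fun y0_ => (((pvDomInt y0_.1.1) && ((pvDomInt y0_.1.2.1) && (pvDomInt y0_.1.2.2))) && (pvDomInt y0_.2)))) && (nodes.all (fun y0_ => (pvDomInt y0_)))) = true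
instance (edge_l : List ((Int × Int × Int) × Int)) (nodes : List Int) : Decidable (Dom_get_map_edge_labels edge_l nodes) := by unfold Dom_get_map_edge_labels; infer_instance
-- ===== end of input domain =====

-- B groups the edges once into a dict keyed by (src,dst) and then concatenates the
-- precomputed row lists along the consecutive node pairs (objective: faster, one pass
-- over the edges instead of one scan per node pair).

-- ===== PORT A =====
-- for i in range(len(nodes)-1): for edge_info in edge_l: if match: extend([[...]])
def get_map_edge_labels (edge_l : List ((Int × Int × Int) × Int)) (nodes : List Int) : List (List Int) :=
  (PySem.List.pyRange 0 ((nodes.length : Int) - 1) 1).foldl (fun edge_labels i =>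
    let src_node := PySem.List.pyGetD nodes i 0      -- index always in range here, so getD is exact
    let dst_node := PySem.List.pyGetD nodes (i + 1) 0
    edge_l.foldl (fun acc e =>
      if e.1.1 == src_node && e.1.2.1 == dst_node then
        acc ++ [[src_node, dst_node, e.1.2.2, e.2]]
      else acc) edge_labels) []

-- ===== PORT B =====
def get_map_edge_labels_alt (edge_l : List ((Int × Int × Int) × Int)) (nodes : List Int) : List (List Int) :=
  -- groups.setdefault((s,d),[]).append([s,d,k,label])
  let groups : PySem.Dict (Int × Int) (List (List Int)) :=
    edge_l.foldl (fun g e =>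
      g.modify (e.1.1, e.1.2.1) [] (fun xs => xs ++ [[e.1.1, e.1.2.1, e.1.2.2, e.2]]))
      PySem.Dict.empty
  -- for pair in zip(nodes, nodes[1:]): edge_labels.extend(groups.get(pair, []))
  (nodes.zip (nodes.drop 1)).foldl (fun edge_labels pair =>
    edge_labels ++ groups.getD pair []) []

-- ===== PRECONDITION & SPEC =====
def Spec_get_map_edge_labels (edge_l : List ((Int × Int × Int) × Int)) (nodes : List Int) (out : List (List Int)) : Prop := out = get_map_edge_labels_alt edge_l nodes
instance (edge_l : List ((Int × Int × Int) × Int)) (nodes : List Int) (out : List (List Int)) : Decidable (Spec_get_map_edge_labels edge_l nodes out) := by unfold Spec_get_map_edge_labels; infer_instance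

-- ===== CLAIM (what is proved, stated in full; the proofs are below) =====
def Claim_equal_get_map_edge_labels : Prop := ∀ (edge_l : List ((Int × Int × Int) × Int)) (nodes : List Int), Dom_get_map_edge_labels edge_l nodes → Spec_get_map_edge_labels edge_l nodes (get_map_edge_labels edge_l nodes)

-- ===== LEMMAS AND PROOFS =====

-- consecutive index pairs read through pyGetD are exactly zip nodes (nodes.drop 1)
theorem pairs_eq_nat (nodes : List Int) :
    (List.range (nodes.length - 1)).map (fun k => (nodes.getD k 0, nodes.getD (k + 1) 0))
    = nodes.zip (nodes.drop 1) := by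
  induction nodes with
  | nil => simp
  | cons x t ih =>
    cases t with
    | nil => simp
    | cons y u =>
      rw [show (x :: y :: u).length - 1 = u.length + 1 by simp]
      rw [List.range_succ_eq_map, List.map_cons, List.map_map]
      simp only [Function.comp_def, Nat.succ_eq_add_one, List.getD_cons_succ,
        List.getD_cons_zero, List.drop_one, List.tail_cons, List.zip_cons_cons]
      refine congrArg _ ?_
      simp only [List.length_cons, Nat.add_sub_cancel, List.drop_one, List.tail_cons] at ih
      exact ih

theorem pairs_eq (nodes : List Int) :
    (PySem.List.pyRange 0 ((nodes.length : Int) - 1) 1).map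
      (fun i => (PySem.List.pyGetD nodes i 0, PySem.List.pyGetD nodes (i + 1) 0))
    = nodes.zip (nodes.drop 1) := by
  rw [PySem.List.pyRange_one, List.map_map, ← pairs_eq_nat nodes]
  have hlen : (((nodes.length : Int) - 1) - 0).toNat = nodes.length - 1 := by omega
  rw [hlen]
  refine List.map_congr_left ?_
  intro k hk
  have h1 : ((0 : Int) + (k : Int)) = ((k : Nat) : Int) := by ring
  have h2 : ((k : Int) + 1) = (((k + 1 : Nat)) : Int) := by push_cast; ring
  simp only [Function.comp_def, h1, h2, PySem.List.pyGetD_natCast]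

-- the grouping dict looked up at a pair is the filtered, row-mapped edge list
theorem groups_getD (edge_l : List ((Int × Int × Int) × Int)) (p : Int × Int) :
    (edge_l.foldl (fun g e =>
        g.modify (e.1.1, e.1.2.1) [] (fun xs => xs ++ [[e.1.1, e.1.2.1, e.1.2.2, e.2]]))
        (PySem.Dict.empty : PySem.Dict (Int × Int) (List (List Int)))).getD p []
    = (edge_l.filter (fun e => (e.1.1, e.1.2.1) == p)).map
        (fun e => [e.1.1, e.1.2.1, e.1.2.2, e.2]) := by
  have hmap := List.foldl_map
    (f := fun (e : (Int × Int × Int) × Int) =>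
      ((e.1.1, e.1.2.1), [e.1.1, e.1.2.1, e.1.2.2, e.2]))
    (g := fun (d : PySem.Dict (Int × Int) (List (List Int)))
            (q : (Int × Int) × List Int) => d.modify q.1 [] (fun xs => xs ++ [q.2]))
    (l := edge_l) (init := (PySem.Dict.empty : PySem.Dict (Int × Int) (List (List Int))))
  rw [← hmap, PySem.Dict.getD_foldl_modify_append, List.filter_map, List.map_map]
  simp [Function.comp_def]

-- ===== VERDICT (by name: the statement is the Claim_ definition above) =====
theorem get_map_edge_labels_spec : Claim_equal_get_map_edge_labels := by
  intro edge_l nodes _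
  show get_map_edge_labels edge_l nodes = get_map_edge_labels_alt edge_l nodes
  unfold get_map_edge_labels get_map_edge_labels_alt
  simp only [groups_getD, PySem.List.foldl_append_if, PySem.List.foldl_append_eq_flatMap,
    List.nil_append]
  rw [← pairs_eq nodes, List.flatMap_map]
  rw [List.flatMap_def, List.flatMap_def]
  refine congrArg List.flatten (List.map_congr_left ?_)
  intro i _
  have hfilter : (fun (e : (Int × Int × Int) × Int) =>
      e.1.1 == PySem.List.pyGetD nodes i 0 && e.1.2.1 == PySem.List.pyGetD nodes (i + 1) 0)
      = (fun (e : (Int × Int × Int) × Int) =>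
      (e.1.1, e.1.2.1) == (PySem.List.pyGetD nodes i 0, PySem.List.pyGetD nodes (i + 1) 0)) := by
    funext e
    rfl
  rw [hfilter]
  refine List.map_congr_left ?_
  intro e he
  have hm := (List.mem_filter.mp he).2
  have hp := Prod.mk.inj (beq_iff_eq.mp hm)
  simp [hp.1, hp.2]
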